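-- pv_equiv track=rewrite | github.com/KURUPRASATH-J/JUNO_AI | app.py | check_for_name_query
-- ===== SOURCE A (Python) =====
-- def check_for_name_query(user_message):
--     """Check if user is asking about their name"""
--     message_lower = user_message.lower()
--     name_queries = [
--         "what is my name",
--         "what's my name",
--         "do you know my name",
--         "remember my name",
--         "my name"
--     ]
--     return any(query in message_lower for query in name_queries)
-- ===== SOURCE B (Python) =====
-- def check_for_name_query(user_message):
--     """Check if user is asking about their name"""
--     # Every listed phrase contains "my name", so one membership test suffices.
--     return "my name" in user_message.lower()
-- ===== Notes on version B (the rewrite author's own statement) =====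
-- stated objective: simpler
-- what changed: The any()-over-five-patterns loop collapses to a single substring membership test for the shortest pattern, which every other listed pattern contains.
import Mathlib
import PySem

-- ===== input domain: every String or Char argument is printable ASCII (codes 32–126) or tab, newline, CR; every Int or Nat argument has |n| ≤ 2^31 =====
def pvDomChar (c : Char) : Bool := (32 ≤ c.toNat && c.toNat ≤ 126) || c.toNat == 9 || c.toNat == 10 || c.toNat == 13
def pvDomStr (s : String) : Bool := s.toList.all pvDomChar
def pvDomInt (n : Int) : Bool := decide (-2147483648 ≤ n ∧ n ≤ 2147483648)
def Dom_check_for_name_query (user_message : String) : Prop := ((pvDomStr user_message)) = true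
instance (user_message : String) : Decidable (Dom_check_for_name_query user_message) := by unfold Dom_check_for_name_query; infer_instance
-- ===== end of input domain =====

-- B collapses the any()-over-five-patterns loop into one "my name" substring test (simpler; every pattern contains "my name").


-- ===== PORT A =====
def check_for_name_query (user_message : String) : Bool :=
  let message_lower := PySem.Str.lower user_message
  let name_queries : List String :=
    ["what is my name",
     "what's my name",
     "do you know my name",
     "remember my name",
     "my name"]
  name_queries.any (fun query => PySem.Str.isIn query message_lower)

-- ===== PORT B =====
def check_for_name_query_alt (user_message : String) : Bool :=
  PySem.Str.isIn "my name" (PySem.Str.lower user_message)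

-- ===== PRECONDITION & SPEC =====
def Spec_check_for_name_query (user_message : String) (out : Bool) : Prop := out = check_for_name_query_alt user_message
instance (user_message : String) (out : Bool) : Decidable (Spec_check_for_name_query user_message out) := by unfold Spec_check_for_name_query; infer_instance

-- ===== CLAIM (what is proved, stated in full; the proofs are below) =====
def Claim_equal_check_for_name_query : Prop := ∀ (user_message : String), Dom_check_for_name_query user_message → Spec_check_for_name_query user_message (check_for_name_query user_message)

-- ===== LEMMAS AND PROOFS =====

-- each listed phrase has "my name" as an infix, so its presence implies "my name"'s presence
theorem isIn_of_isIn_of_infix (q s : String)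
    (h : ("my name" : String).toList <:+: q.toList)
    (hq : PySem.Str.isIn q s = true) : PySem.Str.isIn "my name" s = true := by
  rw [PySem.Str.isIn_iff_infix] at hq ⊢
  exact h.trans hq

-- ===== VERDICT (by name: the statement is the Claim_ definition above) =====
theorem check_for_name_query_spec : Claim_equal_check_for_name_query := by
  intro s _
  unfold Spec_check_for_name_query check_for_name_query check_for_name_query_alt
  simp only [List.any_cons, List.any_nil, Bool.or_false]
  cases h : PySem.Str.isIn "my name" (PySem.Str.lower s) with
  | true =>
    simp only [PySem.Str.isIn] at h ⊢
    simp [h]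
  | false =>
    have k : ∀ q : String, ("my name" : String).toList <:+: q.toList →
        PySem.Str.isIn q (PySem.Str.lower s) = false := by
      intro q hq
      cases hqq : PySem.Str.isIn q (PySem.Str.lower s) with
      | false => rfl
      | true => exact absurd (isIn_of_isIn_of_infix q _ hq hqq) (by rw [h]; exact Bool.false_ne_true)
    rw [k "what is my name" (by decide), k "what's my name" (by decide),
        k "do you know my name" (by decide), k "remember my name" (by decide)]
    simp
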